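-- pv_equiv track=rewrite | github.com/park-sy/1day_1git | Programmers/여행경로.py | solution
-- ===== SOURCE A (Python) =====
-- def solution(tickets):
--     answer = []
--
--     d = {}
--     for st, de in tickets:
--         if st not in d:
--             d[st] = []
--         d[st].append(de)
--
--     for i in d:
--         d[i].sort(reverse=True)
--
--     stk = ["ICN"]
--     while stk:
--         a = stk.pop()
--         if a not in d or not d[a]:
--             answer.append(a)
--         else:
--             stk.append(a)
--             stk.append(d[a].pop())
--
--     return answer[::-1]
-- ===== SOURCE B (Python) =====
-- def solution(tickets):
--     d = {}
--     for st, de in tickets: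
--         d.setdefault(st, []).append(de)
--     for i in d:
--         d[i].sort(reverse=True)
--     answer = []
--
--     def dfs(a):
--         while a in d and d[a]:
--             dfs(d[a].pop())
--         answer.append(a)
--
--     dfs("ICN")
--     return answer[::-1]
-- ===== Notes on version B (the rewrite author's own statement) =====
-- stated objective: simpler
-- what changed: The adjacency dict is built with setdefault and the explicit stack emulation (pop, push back, push child) is replaced by a recursive DFS that appends each exhausted node to the answer; same lexicographic Eulerian path, expressed as recursion instead of a hand-rolled stack.
import Mathlib
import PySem

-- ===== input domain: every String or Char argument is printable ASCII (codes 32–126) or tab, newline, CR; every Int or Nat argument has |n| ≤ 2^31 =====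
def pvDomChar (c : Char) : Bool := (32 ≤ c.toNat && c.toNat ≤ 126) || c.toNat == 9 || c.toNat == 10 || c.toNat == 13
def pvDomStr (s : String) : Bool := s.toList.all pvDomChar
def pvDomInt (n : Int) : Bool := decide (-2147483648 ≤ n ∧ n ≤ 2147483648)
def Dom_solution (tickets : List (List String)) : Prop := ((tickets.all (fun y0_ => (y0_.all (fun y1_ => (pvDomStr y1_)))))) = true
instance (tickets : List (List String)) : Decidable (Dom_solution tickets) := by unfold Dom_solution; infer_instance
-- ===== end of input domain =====

-- B replaces A's explicit stack emulation with a recursive DFS (and builds the dict with setdefault);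
-- same value everywhere A returns — objective: simpler.

-- ===== PORT A =====

-- number of remaining tickets in the adjacency dict (sum over distinct keys of the value lengths);
-- used only as the termination measure of the while loop / the DFS fuel
def pvTC (d : PySem.Dict String (List String)) : Nat :=
  ((PySem.List.dedup d.keys).map (fun k => (d.getD k []).length)).sum

-- popping one ticket from a nonempty slot decreases the measure by exactly one (cited by decreasing_by)
theorem pvTC_insert_dropLast (d : PySem.Dict String (List String)) (a : String)
    (h : d.getD a [] ≠ []) :
    pvTC (d.insert a ((d.getD a []).dropLast)) + 1 = pvTC d := by
  have hc : d.contains a = true := by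
    by_contra hnc
    exact h (PySem.Dict.getD_of_not_contains d [] (by simpa using hnc))
  have hkeys : (d.insert a ((d.getD a []).dropLast)).keys = d.keys :=
    PySem.Dict.keys_insert_of_contains d _ hc
  have hmem : a ∈ PySem.List.dedup d.keys := by
    rw [PySem.List.mem_dedup]
    exact (PySem.Dict.contains_iff_mem_keys d a).mp hc
  have hnd : (PySem.List.dedup d.keys).Nodup := PySem.List.nodup_dedup _
  obtain ⟨s, t, hst⟩ := List.append_of_mem hmem
  have hnd' : (s ++ a :: t).Nodup := hst ▸ hnd
  have has : a ∉ s := fun hx => (List.disjoint_of_nodup_append hnd') hx (List.mem_cons_self ..)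
  have hat : a ∉ t := by
    have := (List.nodup_append.mp hnd').2.1
    exact (List.nodup_cons.mp this).1
  unfold pvTC
  rw [hkeys, hst]
  simp only [List.map_append, List.map_cons, List.sum_append, List.sum_cons]
  have hs : ∀ k ∈ s, ((d.insert a ((d.getD a []).dropLast)).getD k []).length = (d.getD k []).length := by
    intro k hk
    rw [PySem.Dict.getD_insert, if_neg (fun hh : k = a => has (hh ▸ hk))]
  have ht : ∀ k ∈ t, ((d.insert a ((d.getD a []).dropLast)).getD k []).length = (d.getD k []).length := by
    intro k hk
    rw [PySem.Dict.getD_insert, if_neg (fun hh : k = a => hat (hh ▸ hk))]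
  rw [List.map_congr_left hs, List.map_congr_left ht]
  have hself : ((d.insert a ((d.getD a []).dropLast)).getD a []).length + 1 = (d.getD a []).length := by
    rw [PySem.Dict.getD_insert, if_pos rfl, List.length_dropLast]
    have : (d.getD a []).length ≠ 0 := by simpa [List.length_eq_zero_iff] using h
    omega
  omega

-- the ticket-reading loop: 'for st, de in tickets' with 'if st not in d: d[st] = []; d[st].append(de)'
-- (tickets that are not exactly a pair make Python raise ValueError; those inputs are outside Pre_)
def buildA (tickets : List (List String)) : PySem.Dict String (List String) :=
  tickets.foldl
    (fun d t =>
      match t with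
      | [st, de] =>
          (if d.contains st then d else d.insert st []).modify st [] (fun l => l ++ [de])
      | _ => d)
    PySem.Dict.empty

-- 'for i in d: d[i].sort(reverse=True)'
def sortVals (d : PySem.Dict String (List String)) : PySem.Dict String (List String) :=
  d.keys.foldl (fun d k => d.modify k [] (fun l => PySem.List.sorted l (fun x => x) true)) d

-- the while-stack loop of A; the head of 'stk' is the top of Python's stack
def loopA (d : PySem.Dict String (List String)) (stk : List String) (ans : List String) :
    List String :=
  match stk with
  | [] => ans
  | a :: rest =>
    if h : d.getD a [] = [] then
      loopA d rest (ans ++ [a])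
    else
      loopA (d.insert a ((d.getD a []).dropLast)) ((d.getD a []).getLast h :: a :: rest) ans
termination_by 2 * pvTC d + stk.length
decreasing_by
  · simp
  · have := pvTC_insert_dropLast d a h
    simp only [List.length_cons]
    omega

def solution (tickets : List (List String)) : List String :=
  (loopA (sortVals (buildA tickets)) ["ICN"] []).reverse

-- ===== PORT B =====

-- 'd.setdefault(st, []).append(de)'
def buildB (tickets : List (List String)) : PySem.Dict String (List String) :=
  tickets.foldl
    (fun d t =>
      match t with
      | [st, de] => (d.setdefault st []).modify st [] (fun l => l ++ [de])
      | _ => d)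
    PySem.Dict.empty

-- recursive DFS: 'while a in d and d[a]: dfs(d[a].pop()); answer.append(a)'.
-- Returns (final dict, appended suffix of answer); the fuel only makes the recursion
-- structural — solution_alt passes pvTC d + 1, which lemma dfsB_fuel-free reasoning shows is never exhausted.
def dfsB (f : Nat) (d : PySem.Dict String (List String)) (a : String) :
    PySem.Dict String (List String) × List String :=
  match f with
  | 0 => (d, [])
  | f + 1 =>
    if h : d.getD a [] = [] then (d, [a])
    else
      let p1 := dfsB f (d.insert a ((d.getD a []).dropLast)) ((d.getD a []).getLast h)
      let p2 := dfsB f p1.1 a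
      (p2.1, p1.2 ++ p2.2)

def solution_alt (tickets : List (List String)) : List String :=
  let d := sortVals (buildB tickets)
  ((dfsB (pvTC d + 1) d "ICN").2).reverse

-- ===== PRECONDITION & SPEC =====
-- Pre_ excludes exactly the inputs on which 'for st, de in tickets' raises ValueError (a ticket that is not a pair)
def Pre_solution (tickets : List (List String)) : Prop := ∀ t ∈ tickets, t.length = 2
instance (tickets : List (List String)) : Decidable (Pre_solution tickets) := by unfold Pre_solution; infer_instance
def pvWitness_solution : List (List String) := [["ICN", "AAA"], ["AAA", "ICN"]]

def Spec_solution (tickets : List (List String)) (out : List String) : Prop := out = solution_alt tickets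
instance (tickets : List (List String)) (out : List String) : Decidable (Spec_solution tickets out) := by unfold Spec_solution; infer_instance

-- ===== CLAIM (what is proved, stated in full; the proofs are below) =====
def Claim_equal_solution : Prop := ∀ (tickets : List (List String)), Dom_solution tickets → Pre_solution tickets → Spec_solution tickets (solution tickets)

-- ===== LEMMAS AND PROOFS =====

-- the two dict-building loops are the same function (setdefault IS the if-not-in idiom)
theorem buildB_eq_buildA (tickets : List (List String)) : buildB tickets = buildA tickets := by
  unfold buildA buildB
  apply PySem.List.foldl_congr_mem
  intro d t _
  match t with
  | [] => rfl
  | [_] => rfl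
  | st :: de :: _ :: _ => rfl
  | [st, de] =>
    by_cases hc : d.contains st = true
    · simp only [PySem.Dict.setdefault_of_contains d _ hc, if_pos hc]
    · simp only [PySem.Dict.setdefault_of_not_contains d _ (by simpa using hc), if_neg hc]

-- the DFS never increases the ticket count
theorem pvTC_dfsB_le (f : Nat) (d : PySem.Dict String (List String)) (a : String) :
    pvTC (dfsB f d a).1 ≤ pvTC d := by
  induction f generalizing d a with
  | zero => simp [dfsB]
  | succ f ih =>
    rw [dfsB]
    by_cases h : d.getD a [] = []
    · simp [h]
    · simp only [dif_neg h]
      have h1 := pvTC_insert_dropLast d a h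
      have h2 := ih (d.insert a ((d.getD a []).dropLast)) ((d.getD a []).getLast h)
      have h3 := ih (dfsB f (d.insert a ((d.getD a []).dropLast)) ((d.getD a []).getLast h)).1 a
      omega

-- the bridge: one pop-expand-collapse round of A's stack loop at 'a' is one DFS call at 'a'
theorem loopA_eq_dfsB (f : Nat) (d : PySem.Dict String (List String)) (a : String)
    (rest ans : List String) (hf : pvTC d < f) :
    loopA d (a :: rest) ans = loopA (dfsB f d a).1 rest (ans ++ (dfsB f d a).2) := by
  induction f generalizing d a rest ans with
  | zero => omega
  | succ f ih =>
    rw [loopA, dfsB]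
    by_cases h : d.getD a [] = []
    · simp [h]
    · simp only [dif_neg h]
      have h1 := pvTC_insert_dropLast d a h
      have hf1 : pvTC (d.insert a ((d.getD a []).dropLast)) < f := by omega
      rw [ih _ _ _ _ hf1]
      have hf2 : pvTC (dfsB f (d.insert a ((d.getD a []).dropLast)) ((d.getD a []).getLast h)).1 < f :=
        lt_of_le_of_lt (pvTC_dfsB_le _ _ _) hf1
      rw [ih _ _ _ _ hf2]
      simp [List.append_assoc]

-- ===== VERDICT (by name: the statement is the Claim_ definition above) =====
theorem solution_spec : Claim_equal_solution := by
  intro tickets _ _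
  unfold Spec_solution solution solution_alt
  rw [buildB_eq_buildA]
  rw [loopA_eq_dfsB (pvTC (sortVals (buildA tickets)) + 1) _ _ _ _ (by omega)]
  rw [loopA]
  simp
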